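-- pv_equiv track=rewrite | github.com/nicolasdickenmann/builddatsetadvanced | network-design-main/topologies/topogen/OFTGenerator.py | get_ML3B
-- ===== SOURCE A (Python) =====
-- def get_MOLS(n : int) -> [[[int]]]:
--
--     mols = []
--     for k in range(1,n):
--         ols = []
--         for j in range(0,n):
--             row = []
--             for i in range(0,n):
--                 row.append((k*i + j) % n)
--             ols.append(row)
--         mols.append(ols)
--     return mols
--
-- def get_ML3B(k : int) -> [[int]]:
--     Rl = 1 + k*(k-1)
--
--     tabular = [[] for _ in range(0,Rl)]
--
--     # step 1: fill first row
--     for i in range(0,k):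
--         tabular[0].append(Rl + i - k)
--
--     # step 2: fill remaining entires of first column
--     for i in range(0,k):
--         for j in range(1, k):
--             tabular[i*(k-1) + j].append(Rl - k + i)
--
--     # step 3.1: insert 1st block in tabular
--     # bulding (k-1) x (k-1) block filled with numbers 0 to (k-1)^2 - 1
--     # order from left to right, top to bottom
--     block = []
--     for i in range(0,k-1):
--         row = []
--         for j in range(0,k-1):
--             row.append(i*(k-1) + j)
--         block.append(row)
--
--     # insert block in tabular
--     tabular = fill_in_block(tabular, block, 1, k-1)
--
--     # step 3.2: insert 2nd block in tabular, which is the transposed from the 1st block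
--     trasnposed_block = list(map(list, zip(*block))) # assumes quadratic matrix
--     tabular = fill_in_block(tabular,trasnposed_block, k, k-1)
--
--     # step 3.3: insert MOLS in the remaining k-2 blocks
--     mols = get_MOLS(k-1) # k-1 is prime
--     # modfy mols
--     for o in range(0,k-2):
--         for i in range(0,k-1):
--             for j in range(0, k-1):
--                 mols[o][i][j] +=j*(k - 1)
--
--     for i in range(0,k-2):
--         tabular = fill_in_block(tabular, mols[i], (i+2)*(k-1) + 1, k-1)
--
--     return tabular
--
-- def fill_in_block(matrix : [[int]], submatrix : [[int]], start_row : int , sub_rows : int):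
--
--     for i in range(0,sub_rows):
--             matrix[start_row + i] += submatrix[i]
--     return matrix
-- ===== SOURCE B (Python) =====
-- def get_ML3B(k: int) -> [[int]]:
--     Rl = 1 + k * (k - 1)
--     rows = [list(range(Rl - k, Rl))] + [[] for _ in range(1, Rl)]
--     for i in range(k):
--         for t in range(k - 1):
--             if i == 0:
--                 body = [t * (k - 1) + j for j in range(k - 1)]
--             elif i == 1:
--                 body = [j * (k - 1) + t for j in range(k - 1)]
--             else:
--                 body = [((i - 1) * j + t) % (k - 1) + j * (k - 1) for j in range(k - 1)]
--             rows[i * (k - 1) + t + 1] = [Rl - k + i] + body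
--     return rows
-- ===== Notes on version B (the rewrite author's own statement) =====
-- stated objective: alternative
-- what changed: B fills a preallocated table in one pass over (block, row-in-block) pairs using closed-form formulas for the first column and for the three kinds of blocks (identity, transpose, modular MOLS), eliminating A's get_MOLS construction, its explicit transpose and the repeated fill_in_block mutation.
import Mathlib
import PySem

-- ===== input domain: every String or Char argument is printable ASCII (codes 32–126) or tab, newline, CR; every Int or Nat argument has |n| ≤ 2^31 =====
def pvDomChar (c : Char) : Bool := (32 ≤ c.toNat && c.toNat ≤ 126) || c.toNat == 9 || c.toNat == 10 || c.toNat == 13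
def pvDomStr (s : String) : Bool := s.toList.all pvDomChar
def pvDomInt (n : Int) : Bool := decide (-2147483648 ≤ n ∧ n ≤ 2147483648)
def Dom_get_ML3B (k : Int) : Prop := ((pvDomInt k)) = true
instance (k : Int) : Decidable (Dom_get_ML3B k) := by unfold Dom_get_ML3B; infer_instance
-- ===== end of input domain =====

-- B fills a preallocated table in one pass over (block, row) pairs using closed-form formulas for
-- the first column and for the three kinds of blocks (identity, transpose, modular MOLS), instead
-- of A's get_MOLS construction, explicit transpose and repeated fill_in_block mutation.

-- ===== PORT A =====

-- tabular[i].append / tabular[i] += … : modify at a (here always non-negative, in-range) index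
def pvModAt (t : List (List Int)) (i : Int) (f : List Int → List Int) : List (List Int) :=
  if 0 ≤ i then t.modify i.toNat f else t

-- fill_in_block: matrix[start_row + i] += submatrix[i]  (indices are in range whenever executed)
def pvFillInBlock (matrix submatrix : List (List Int)) (start_row sub_rows : Int) :
    List (List Int) :=
  (PySem.List.pyRange 0 sub_rows 1).foldl
    (fun m i => pvModAt m (start_row + i) (fun row => row ++ PySem.List.pyGetD submatrix i []))
    matrix

-- list(map(list, zip(*block))) : exact zip semantics (truncates at the shortest row)
def pvZipStar (m : List (List Int)) : List (List Int) :=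
  if h : m.isEmpty || m.any (·.isEmpty) then []
  else (m.map (fun r => r.headD 0)) :: pvZipStar (m.map (fun r => r.tail))
termination_by (m.headD []).length
decreasing_by
  cases m with
  | nil => simp at h
  | cons a as =>
      simp only [List.isEmpty_cons, List.any_cons, Bool.or_eq_true, List.isEmpty_iff] at h
      push Not at h
      simp only [List.headD_cons]
      cases a with
      | nil => exact absurd rfl h.2.1
      | cons x xs => simp

def get_MOLS (n : Int) : List (List (List Int)) :=
  (PySem.List.pyRange 1 n 1).map (fun k =>
    (PySem.List.pyRange 0 n 1).map (fun j =>
      (PySem.List.pyRange 0 n 1).map (fun i => PySem.Int.mod (k * i + j) n)))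

def get_ML3B (k : Int) : List (List Int) :=
  let Rl := 1 + k * (k - 1)
  let tabular : List (List Int) := (PySem.List.pyRange 0 Rl 1).map (fun _ => [])
  -- step 1: fill first row
  let tabular := (PySem.List.pyRange 0 k 1).foldl
    (fun t i => pvModAt t 0 (fun row => row ++ [Rl + i - k])) tabular
  -- step 2: fill remaining entries of first column
  let tabular := (PySem.List.pyRange 0 k 1).foldl
    (fun t i => (PySem.List.pyRange 1 k 1).foldl
      (fun t j => pvModAt t (i * (k - 1) + j) (fun row => row ++ [Rl - k + i])) t) tabular
  -- step 3.1: first block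
  let block := (PySem.List.pyRange 0 (k - 1) 1).map (fun i =>
    (PySem.List.pyRange 0 (k - 1) 1).map (fun j => i * (k - 1) + j))
  let tabular := pvFillInBlock tabular block 1 (k - 1)
  -- step 3.2: transposed block
  let transposed_block := pvZipStar block
  let tabular := pvFillInBlock tabular transposed_block k (k - 1)
  -- step 3.3: MOLS blocks; the in-place 'mols[o][i][j] += j*(k-1)' loops rebuild each entry
  let mols := get_MOLS (k - 1)
  let mols := (PySem.List.pyRange 0 (k - 2) 1).map (fun o =>
    (PySem.List.pyRange 0 (k - 1) 1).map (fun i =>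
      (PySem.List.pyRange 0 (k - 1) 1).map (fun j =>
        PySem.List.pyGetD (PySem.List.pyGetD (PySem.List.pyGetD mols o []) i []) j 0
          + j * (k - 1))))
  let tabular := (PySem.List.pyRange 0 (k - 2) 1).foldl
    (fun t i => pvFillInBlock t (PySem.List.pyGetD mols i []) ((i + 2) * (k - 1) + 1) (k - 1))
    tabular
  tabular

-- ===== PORT B =====
-- rows[r] = v : assignment at a (here always non-negative, in-range) index
def pvSetAt (t : List (List Int)) (i : Int) (v : List Int) : List (List Int) :=
  if 0 ≤ i then t.modify i.toNat (fun _ => v) else t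

def get_ML3B_alt (k : Int) : List (List Int) :=
  let Rl := 1 + k * (k - 1)
  let rows : List (List Int) :=
    PySem.List.pyRange (Rl - k) Rl 1 :: (PySem.List.pyRange 1 Rl 1).map (fun _ => [])
  (PySem.List.pyRange 0 k 1).foldl (fun rows i =>
    (PySem.List.pyRange 0 (k - 1) 1).foldl (fun rows t =>
      let body :=
        if i = 0 then (PySem.List.pyRange 0 (k - 1) 1).map (fun j => t * (k - 1) + j)
        else if i = 1 then (PySem.List.pyRange 0 (k - 1) 1).map (fun j => j * (k - 1) + t)
        else (PySem.List.pyRange 0 (k - 1) 1).map (fun j =>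
          PySem.Int.mod ((i - 1) * j + t) (k - 1) + j * (k - 1))
      pvSetAt rows (i * (k - 1) + t + 1) ([Rl - k + i] ++ body)) rows) rows

-- ===== PRECONDITION & SPEC =====
-- (no Pre_: A returns normally on every int k, and B matches it everywhere)
def Spec_get_ML3B (k : Int) (out : List (List Int)) : Prop := out = get_ML3B_alt k
instance (k : Int) (out : List (List Int)) : Decidable (Spec_get_ML3B k out) := by
  unfold Spec_get_ML3B; infer_instance

-- ===== CLAIM (what is proved, stated in full; the proofs are below) =====
def Claim_equal_get_ML3B : Prop :=
  ∀ (k : Int), Dom_get_ML3B k → Spec_get_ML3B k (get_ML3B k)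

-- ===== LEMMAS AND PROOFS =====

def pvBlockDef (k : Int) : List (List Int) :=
  (PySem.List.pyRange 0 (k-1) 1).map (fun i =>
    (PySem.List.pyRange 0 (k-1) 1).map (fun j => i * (k-1) + j))

def pvMolsDef (k : Int) : List (List (List Int)) :=
  (PySem.List.pyRange 0 (k-2) 1).map (fun o =>
    (PySem.List.pyRange 0 (k-1) 1).map (fun i =>
      (PySem.List.pyRange 0 (k-1) 1).map (fun j =>
        PySem.List.pyGetD (PySem.List.pyGetD (PySem.List.pyGetD (get_MOLS (k-1)) o []) i []) j 0
          + j * (k-1))))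

theorem A_stages (k : Int) :
    get_ML3B k =
      (PySem.List.pyRange 0 (k-2) 1).foldl
        (fun t i => pvFillInBlock t (PySem.List.pyGetD (pvMolsDef k) i []) ((i+2)*(k-1)+1) (k-1))
        (pvFillInBlock
          (pvFillInBlock
            ((PySem.List.pyRange 0 k 1).foldl
              (fun t i => (PySem.List.pyRange 1 k 1).foldl
                (fun t j => pvModAt t (i*(k-1)+j) (fun row => row ++ [1+k*(k-1) - k + i])) t)
              ((PySem.List.pyRange 0 k 1).foldl
                (fun t i => pvModAt t 0 (fun row => row ++ [1+k*(k-1) + i - k]))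
                ((PySem.List.pyRange 0 (1+k*(k-1)) 1).map (fun _ => []))))
            (pvBlockDef k) 1 (k-1))
          (pvZipStar (pvBlockDef k)) k (k-1)) := rfl


-- B's loop body, named for the proofs
theorem getElem?_pvModAt (t : List (List Int)) (i : Int) (f : List Int → List Int) (n : Nat) :
    (pvModAt t i f)[n]? = if i = (n : Int) then t[n]?.map f else t[n]? := by
  unfold pvModAt
  split_ifs with h1 h2 h3
  · rw [List.getElem?_modify]
    have : i.toNat = n := by omega
    cases h0 : t[n]? <;> simp [this]
  · rw [List.getElem?_modify]
    have : i.toNat ≠ n := by omega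
    cases h0 : t[n]? <;> simp [this]
  · omega
  · rfl

theorem getElem?_foldl_appendAt {β : Type} (L : List β) (idx : β → Int) (w : β → List Int)
    (t : List (List Int)) (n : Nat) :
    (L.foldl (fun t b => pvModAt t (idx b) (fun row => row ++ w b)) t)[n]? =
      t[n]?.map (fun row => row ++ L.flatMap (fun b => if idx b = (n : Int) then w b else [])) := by
  induction L generalizing t with
  | nil => cases h0 : t[n]? <;> simp [h0]
  | cons b L ih =>
      simp only [List.foldl_cons, List.flatMap_cons]
      rw [ih, getElem?_pvModAt]
      split_ifs with h
      · cases h0 : t[n]? <;> simp [h0]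
      · cases h0 : t[n]? <;> simp [h0]

theorem getElem?_pvFillInBlock (mat sub : List (List Int)) (s r : Int) (n : Nat) :
    (pvFillInBlock mat sub s r)[n]? =
      mat[n]?.map (fun row => row ++ (PySem.List.pyRange 0 r 1).flatMap
        (fun i => if s + i = (n : Int) then PySem.List.pyGetD sub i [] else [])) := by
  unfold pvFillInBlock
  exact getElem?_foldl_appendAt _ (fun i => s + i) (fun i => PySem.List.pyGetD sub i []) mat n

theorem getElem?_foldl2 (L1 L2 : List Int) (idx : Int → Int → Int) (w : Int → Int → List Int)
    (t : List (List Int)) (n : Nat) :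
    (L1.foldl (fun t i => L2.foldl
        (fun t j => pvModAt t (idx i j) (fun row => row ++ w i j)) t) t)[n]? =
      t[n]?.map (fun row => row ++ L1.flatMap (fun i => L2.flatMap
        (fun j => if idx i j = (n : Int) then w i j else []))) := by
  induction L1 generalizing t with
  | nil => cases h0 : t[n]? <;> simp [h0]
  | cons a L1 ih =>
      simp only [List.foldl_cons, List.flatMap_cons]
      rw [ih, getElem?_foldl_appendAt L2 (idx a) (w a) t n]
      cases h0 : t[n]? <;> simp [h0]

theorem getElem?_foldl_fill (L : List Int) (subs : Int → List (List Int)) (start : Int → Int)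
    (r : Int) (t : List (List Int)) (n : Nat) :
    (L.foldl (fun t i => pvFillInBlock t (subs i) (start i) r) t)[n]? =
      t[n]?.map (fun row => row ++ L.flatMap (fun i => (PySem.List.pyRange 0 r 1).flatMap
        (fun j => if start i + j = (n : Int) then PySem.List.pyGetD (subs i) j [] else []))) := by
  induction L generalizing t with
  | nil => cases h0 : t[n]? <;> simp [h0]
  | cons a L ih =>
      simp only [List.foldl_cons, List.flatMap_cons]
      rw [ih, getElem?_pvFillInBlock]
      cases h0 : t[n]? <;> simp [h0]

theorem flatMap_ite_of_nodup {β : Type} (L : List Int) (hnd : L.Nodup) (p : Int → Prop)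
    [DecidablePred p] (f : Int → List β) (q : Int) (h : ∀ x ∈ L, p x ↔ x = q) :
    L.flatMap (fun x => if p x then f x else []) = if q ∈ L then f q else [] := by
  induction L with
  | nil => rfl
  | cons a L ih =>
      rw [List.nodup_cons] at hnd
      rw [List.flatMap_cons]
      by_cases ha : a = q
      · subst ha
        rw [if_pos ((h a (by simp)).mpr rfl), if_pos (by simp)]
        have : L.flatMap (fun x => if p x then f x else []) = [] := by
          rw [List.flatMap_eq_nil_iff]
          intro x hx
          rw [if_neg]
          intro hp
          exact hnd.1 (((h x (by simp [hx])).mp hp) ▸ hx)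
        simp [this]
      · rw [if_neg (fun hp => ha ((h a (by simp)).mp hp)), List.nil_append,
            ih hnd.2 (fun x hx => h x (by simp [hx]))]
        by_cases hq : q ∈ L
        · rw [if_pos hq, if_pos (by simp [hq])]
        · rw [if_neg hq, if_neg (by simp [hq, Ne.symm ha])]

theorem flatMap_ite_pyRange {β : Type} (lo hi : Int) (p : Int → Prop) [DecidablePred p]
    (f : Int → List β) (q : Int) (h : ∀ x, lo ≤ x → x < hi → (p x ↔ x = q)) :
    (PySem.List.pyRange lo hi 1).flatMap (fun x => if p x then f x else [])
      = if lo ≤ q ∧ q < hi then f q else [] := by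
  rw [flatMap_ite_of_nodup _ (PySem.List.nodup_pyRange_one lo hi) p f q
      (fun x hx => h x ((PySem.List.mem_pyRange_one).mp hx).1 ((PySem.List.mem_pyRange_one).mp hx).2)]
  by_cases hq : lo ≤ q ∧ q < hi
  · rw [if_pos (PySem.List.mem_pyRange_one.mpr hq), if_pos hq]
  · rw [if_neg (fun hm => hq (PySem.List.mem_pyRange_one.mp hm)), if_neg hq]

theorem map_shift_pyRange (c m : Int) (f : Int → Int) (hf : ∀ x, f x = c + x) :
    (PySem.List.pyRange 0 m 1).map f = PySem.List.pyRange c (c + m) 1 := by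
  rw [PySem.List.pyRange_one 0 m, PySem.List.pyRange_one c (c + m)]
  simp only [List.map_map, Int.sub_zero, add_sub_cancel_left]
  apply List.map_congr_left
  intro x _
  simp [hf]

theorem pvZipStar_cons (m : List (List Int)) (hm : m ≠ []) (hne : ∀ r ∈ m, r ≠ []) :
    pvZipStar m = (m.map (fun r => r.headD 0)) :: pvZipStar (m.map (fun r => r.tail)) := by
  rw [pvZipStar, dif_neg]
  simp only [Bool.or_eq_true, List.any_eq_true, List.isEmpty_iff]
  push Not
  exact ⟨hm, hne⟩

theorem pvZipStar_nil (m : List (List Int)) (h : m = [] ∨ ∃ r ∈ m, r = []) :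
    pvZipStar m = [] := by
  rw [pvZipStar, dif_pos]
  simp only [Bool.or_eq_true, List.any_eq_true, List.isEmpty_iff]
  tauto

theorem zipStar_map_map (rows : List Int) (hrows : rows ≠ []) (lo hi : Int)
    (f : Int → Int → Int) :
    pvZipStar (rows.map (fun i => (PySem.List.pyRange lo hi 1).map (f i)))
      = (PySem.List.pyRange lo hi 1).map (fun j => rows.map (fun i => f i j)) := by
  by_cases hlt : lo < hi
  · obtain ⟨n, hn⟩ : ∃ n : Nat, (hi - lo).toNat = n := ⟨_, rfl⟩
    induction n generalizing lo with
    | zero => omega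
    | succ m ih =>
        rw [PySem.List.pyRange_one_cons hlt]
        simp only [List.map_cons]
        rw [pvZipStar_cons _ (by simp [hrows]) (by simp)]
        have htails : (rows.map (fun i => f i lo :: (PySem.List.pyRange (lo+1) hi 1).map (f i))).map
            (fun r => r.tail) = rows.map (fun i => (PySem.List.pyRange (lo+1) hi 1).map (f i)) := by
          simp [List.map_map]
        have hheads : (rows.map (fun i => f i lo :: (PySem.List.pyRange (lo+1) hi 1).map (f i))).map
            (fun r => r.headD 0) = rows.map (fun i => f i lo) := by
          simp [List.map_map]
        rw [htails, hheads]
        congr 1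
        by_cases h2 : lo + 1 < hi
        · exact ih (lo+1) h2 (by omega)
        · rw [PySem.List.pyRange_one_eq_nil (by omega)]
          simp only [List.map_nil]
          apply pvZipStar_nil
          right
          cases rows with
          | nil => exact absurd rfl hrows
          | cons a as => exact ⟨[], by simp, rfl⟩
  · rw [PySem.List.pyRange_one_eq_nil (by omega)]
    simp only [List.map_nil]
    apply pvZipStar_nil
    right
    cases rows with
    | nil => exact absurd rfl hrows
    | cons a as => exact ⟨[], by simp, rfl⟩
theorem A_getElem? (k : Int) (n : Nat) :
    (get_ML3B k)[n]? =
      (((PySem.List.pyRange 0 (1+k*(k-1)) 1).map (fun _ => ([] : List Int)))[n]?).map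
        (fun row => row
          ++ (PySem.List.pyRange 0 k 1).flatMap
               (fun i => if (0:Int) = (n:Int) then [1+k*(k-1) + i - k] else [])
          ++ (PySem.List.pyRange 0 k 1).flatMap (fun i => (PySem.List.pyRange 1 k 1).flatMap
               (fun j => if i*(k-1)+j = (n:Int) then [1+k*(k-1) - k + i] else []))
          ++ (PySem.List.pyRange 0 (k-1) 1).flatMap
               (fun i => if 1 + i = (n:Int) then PySem.List.pyGetD (pvBlockDef k) i [] else [])
          ++ (PySem.List.pyRange 0 (k-1) 1).flatMap
               (fun i => if k + i = (n:Int) then PySem.List.pyGetD (pvZipStar (pvBlockDef k)) i [] else [])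
          ++ (PySem.List.pyRange 0 (k-2) 1).flatMap
               (fun i => (PySem.List.pyRange 0 (k-1) 1).flatMap
                 (fun j => if (i+2)*(k-1)+1 + j = (n:Int)
                   then PySem.List.pyGetD (PySem.List.pyGetD (pvMolsDef k) i []) j [] else []))) := by
  rw [A_stages k, getElem?_foldl_fill, getElem?_pvFillInBlock, getElem?_pvFillInBlock,
      getElem?_foldl2, getElem?_foldl_appendAt]
  cases h0 : ((PySem.List.pyRange 0 (1+k*(k-1)) 1).map (fun _ => ([] : List Int)))[n]? <;>
    simp [h0, List.append_assoc]
theorem pyRange_nonempty (a b : Int) (h : a < b) : PySem.List.pyRange a b 1 ≠ [] := by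
  rw [PySem.List.pyRange_one_cons h]
  simp

theorem flatMap_singleton_eq_map (l : List Int) (f : Int → Int) :
    l.flatMap (fun i => [f i]) = l.map f := by
  induction l with
  | nil => rfl
  | cons a l ih => simp [ih]

theorem W2_eval (k N : Int) (hk : 2 ≤ k) :
    (PySem.List.pyRange 0 k 1).flatMap (fun i => (PySem.List.pyRange 1 k 1).flatMap
        (fun j => if i*(k-1)+j = N then [1+k*(k-1) - k + i] else []))
      = if 0 ≤ PySem.Int.floordiv (N-1) (k-1) ∧ PySem.Int.floordiv (N-1) (k-1) < k
          then [1+k*(k-1) - k + PySem.Int.floordiv (N-1) (k-1)] else [] := by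
  have hk1 : (0:Int) < k - 1 := by omega
  have hin : ∀ i : Int, (PySem.List.pyRange 1 k 1).flatMap
        (fun j => if i*(k-1)+j = N then [1+k*(k-1) - k + i] else [])
      = if 1 ≤ N - i*(k-1) ∧ N - i*(k-1) < k then [1+k*(k-1) - k + i] else [] := by
    intro i
    exact flatMap_ite_pyRange 1 k _ _ (N - i*(k-1))
      (fun x hx1 hx2 => by constructor <;> intro h <;> linarith)
  simp only [hin]
  apply flatMap_ite_pyRange 0 k _ _ (PySem.Int.floordiv (N-1) (k-1))
  intro x hx1 hx2
  have hexp : (x+1)*(k-1) = x*(k-1)+(k-1) := by ring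
  constructor
  · intro hc
    exact ((PySem.Int.floordiv_eq_iff_of_pos hk1).mpr ⟨by linarith, by linarith⟩).symm
  · intro hx
    have := (PySem.Int.floordiv_eq_iff_of_pos hk1).mp hx.symm
    constructor <;> linarith [this.1, this.2]

theorem W3_eval (k N : Int) (hk : 2 ≤ k) :
    (PySem.List.pyRange 0 (k-1) 1).flatMap
        (fun i => if 1 + i = N then PySem.List.pyGetD (pvBlockDef k) i [] else [])
      = if 0 ≤ N-1 ∧ N-1 < k-1
          then (PySem.List.pyRange 0 (k-1) 1).map (fun j => (N-1)*(k-1)+j) else [] := by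
  rw [flatMap_ite_pyRange 0 (k-1) _ _ (N-1) (fun x hx1 hx2 => by constructor <;> intro <;> omega)]
  split_ifs with hg
  · exact PySem.List.pyGetD_map_pyRange_of_nonneg _ (k-1) (N-1) [] hg.1 hg.2
  · rfl

theorem W4_eval (k N : Int) (hk : 2 ≤ k) :
    (PySem.List.pyRange 0 (k-1) 1).flatMap
        (fun i => if k + i = N then PySem.List.pyGetD (pvZipStar (pvBlockDef k)) i [] else [])
      = if 0 ≤ N-k ∧ N-k < k-1
          then (PySem.List.pyRange 0 (k-1) 1).map (fun i => i*(k-1)+(N-k)) else [] := by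
  have hZ : pvZipStar (pvBlockDef k)
      = (PySem.List.pyRange 0 (k-1) 1).map (fun j =>
          (PySem.List.pyRange 0 (k-1) 1).map (fun i => i*(k-1)+j)) :=
    zipStar_map_map (PySem.List.pyRange 0 (k-1) 1) (pyRange_nonempty 0 (k-1) (by omega)) 0 (k-1)
      (fun i j => i*(k-1)+j)
  rw [pvBlockDef] at hZ
  rw [pvBlockDef, hZ,
    flatMap_ite_pyRange 0 (k-1) _ _ (N-k) (fun x hx1 hx2 => by constructor <;> intro <;> omega)]
  split_ifs with hg
  · exact PySem.List.pyGetD_map_pyRange_of_nonneg _ (k-1) (N-k) [] hg.1 hg.2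
  · rfl

theorem W5_eval (k N : Int) (hk : 2 ≤ k) :
    (PySem.List.pyRange 0 (k-2) 1).flatMap
        (fun i => (PySem.List.pyRange 0 (k-1) 1).flatMap
          (fun j => if (i+2)*(k-1)+1 + j = N
            then PySem.List.pyGetD (PySem.List.pyGetD (pvMolsDef k) i []) j [] else []))
      = if 0 ≤ PySem.Int.floordiv (N-1) (k-1) - 2 ∧ PySem.Int.floordiv (N-1) (k-1) - 2 < k-2
          then (if 0 ≤ N - ((PySem.Int.floordiv (N-1) (k-1))*(k-1)+1)
                  ∧ N - ((PySem.Int.floordiv (N-1) (k-1))*(k-1)+1) < k-1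
            then (PySem.List.pyRange 0 (k-1) 1).map (fun j =>
              PySem.Int.mod ((PySem.Int.floordiv (N-1) (k-1) - 1)*j
                + (N - ((PySem.Int.floordiv (N-1) (k-1))*(k-1)+1))) (k-1) + j*(k-1))
            else [])
          else [] := by
  have hk1 : (0:Int) < k - 1 := by omega
  set Q : Int := PySem.Int.floordiv (N-1) (k-1) with hQ
  have hin : ∀ i : Int, (PySem.List.pyRange 0 (k-1) 1).flatMap
        (fun j => if (i+2)*(k-1)+1 + j = N
          then PySem.List.pyGetD (PySem.List.pyGetD (pvMolsDef k) i []) j [] else [])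
      = if 0 ≤ N - ((i+2)*(k-1)+1) ∧ N - ((i+2)*(k-1)+1) < k-1
          then PySem.List.pyGetD (PySem.List.pyGetD (pvMolsDef k) i []) (N - ((i+2)*(k-1)+1)) []
          else [] := by
    intro i
    exact flatMap_ite_pyRange 0 (k-1) _ _ (N - ((i+2)*(k-1)+1))
      (fun x hx1 hx2 => by constructor <;> intro h <;> linarith)
  simp only [hin]
  rw [flatMap_ite_pyRange 0 (k-2) _ _ (Q-2) ?hcond]
  case hcond =>
    intro x hx1 hx2
    have hexp : (x+2+1)*(k-1) = (x+2)*(k-1)+(k-1) := by ring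
    constructor
    · intro hc
      have : PySem.Int.floordiv (N-1) (k-1) = x+2 :=
        (PySem.Int.floordiv_eq_iff_of_pos hk1).mpr ⟨by linarith, by linarith⟩
      rw [hQ, this]
      ring
    · intro hx
      have hQx : PySem.Int.floordiv (N-1) (k-1) = x+2 := by rw [← hQ]; linarith
      have := (PySem.Int.floordiv_eq_iff_of_pos hk1).mp hQx
      constructor <;> linarith [this.1, this.2]
  have he : (Q-2+2)*(k-1)+1 = Q*(k-1)+1 := by ring
  rw [he]
  split_ifs with hg1 hg2
  · -- evaluate the pyGetD chain
    set idx : Int := N - (Q*(k-1)+1) with hidx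
    rw [pvMolsDef,
        PySem.List.pyGetD_map_pyRange_of_nonneg _ (k-2) (Q-2) [] hg1.1 hg1.2,
        PySem.List.pyGetD_map_pyRange_of_nonneg _ (k-1) idx [] hg2.1 hg2.2]
    apply List.map_congr_left
    intro j hj
    rw [PySem.List.mem_pyRange_one] at hj
    have hshift : PySem.List.pyRange 1 (k-1) 1 = (PySem.List.pyRange 0 (k-2) 1).map (fun x => 1+x) := by
      rw [map_shift_pyRange 1 (k-2) _ (fun x => rfl)]
      congr 1
      ring
    have hmols : get_MOLS (k-1)
        = (PySem.List.pyRange 0 (k-2) 1).map (fun o =>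
            (PySem.List.pyRange 0 (k-1) 1).map (fun j' =>
              (PySem.List.pyRange 0 (k-1) 1).map (fun i' =>
                PySem.Int.mod ((1+o)*i' + j') (k-1)))) := by
      rw [get_MOLS, hshift, List.map_map]
      rfl
    rw [hmols,
        PySem.List.pyGetD_map_pyRange_of_nonneg _ (k-2) (Q-2) [] hg1.1 hg1.2,
        PySem.List.pyGetD_map_pyRange_of_nonneg _ (k-1) idx [] hg2.1 hg2.2,
        PySem.List.pyGetD_map_pyRange_of_nonneg _ (k-1) j 0 hj.1 hj.2]
    have : (1+(Q-2)) = Q - 1 := by ring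
    rw [this]
  · have hdm := PySem.Int.floordiv_mul_add_mod (N-1) (k-1)
    have hm0 := PySem.Int.mod_nonneg (N-1) hk1
    have hm1 := PySem.Int.mod_lt (N-1) hk1
    exact absurd ⟨by linarith, by linarith⟩ hg2
  · rfl
theorem getElem?_foldl_modAt {β : Type} (L : List β) (idx : β → Int)
    (g : β → List Int → List Int) (t : List (List Int)) (n : Nat) :
    (L.foldl (fun t b => pvModAt t (idx b) (g b)) t)[n]? =
      t[n]?.map (fun row =>
        (L.flatMap (fun b => if idx b = (n : Int) then [b] else [])).foldl
          (fun r b => g b r) row) := by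
  induction L generalizing t with
  | nil => cases h0 : t[n]? <;> simp [h0]
  | cons b L ih =>
      simp only [List.foldl_cons, List.flatMap_cons]
      rw [ih, getElem?_pvModAt]
      split_ifs with h
      · cases h0 : t[n]? <;> simp [h0]
      · cases h0 : t[n]? <;> simp [h0]

theorem flatMap_pair {c : Int → Prop} [DecidablePred c] (L : List Int) (a : Int) :
    L.flatMap (fun j => if c j then [(a, j)] else [])
      = (L.flatMap (fun j => if c j then [j] else [])).map (fun j => (a, j)) := by
  induction L with
  | nil => rfl
  | cons x L ih =>
      simp only [List.flatMap_cons, List.map_append, ih]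
      split_ifs <;> simp

theorem getElem?_foldl2_mod (L1 L2 : List Int) (idx : Int → Int → Int)
    (g : Int → Int → List Int → List Int) (t : List (List Int)) (n : Nat) :
    (L1.foldl (fun t i => L2.foldl (fun t j => pvModAt t (idx i j) (g i j)) t) t)[n]? =
      t[n]?.map (fun row =>
        (L1.flatMap (fun i => L2.flatMap (fun j =>
            if idx i j = (n : Int) then [(i, j)] else []))).foldl
          (fun r p => g p.1 p.2 r) row) := by
  induction L1 generalizing t with
  | nil => cases h0 : t[n]? <;> simp [h0]
  | cons a L1 ih =>
      simp only [List.foldl_cons, List.flatMap_cons]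
      rw [ih, getElem?_foldl_modAt L2 (idx a) (g a) t n]
      cases h0 : t[n]? <;>
        simp [h0, flatMap_pair (c := fun j => idx a j = (n : Int)) L2 a,
          List.foldl_append, List.foldl_map]

theorem hits_eval (k N : Int) (hk : 2 ≤ k) :
    (PySem.List.pyRange 0 k 1).flatMap (fun i => (PySem.List.pyRange 0 (k-1) 1).flatMap
        (fun t => if i*(k-1)+t+1 = N then [(i, t)] else []))
      = if 0 ≤ PySem.Int.floordiv (N-1) (k-1) ∧ PySem.Int.floordiv (N-1) (k-1) < k
          then [(PySem.Int.floordiv (N-1) (k-1), N - (PySem.Int.floordiv (N-1) (k-1))*(k-1) - 1)]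
          else [] := by
  have hk1 : (0:Int) < k - 1 := by omega
  have hin : ∀ i : Int, (PySem.List.pyRange 0 (k-1) 1).flatMap
        (fun t => if i*(k-1)+t+1 = N then [(i, t)] else [])
      = if 0 ≤ N - i*(k-1) - 1 ∧ N - i*(k-1) - 1 < k-1 then [(i, N - i*(k-1) - 1)] else [] := by
    intro i
    exact flatMap_ite_pyRange 0 (k-1) _ _ (N - i*(k-1) - 1)
      (fun x hx1 hx2 => by constructor <;> intro h <;> linarith)
  simp only [hin]
  apply flatMap_ite_pyRange 0 k _ _ (PySem.Int.floordiv (N-1) (k-1))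
  intro x hx1 hx2
  have hexp : (x+1)*(k-1) = x*(k-1)+(k-1) := by ring
  constructor
  · intro hc
    exact ((PySem.Int.floordiv_eq_iff_of_pos hk1).mpr ⟨by linarith, by linarith⟩).symm
  · intro hx
    have := (PySem.Int.floordiv_eq_iff_of_pos hk1).mp hx.symm
    constructor <;> linarith [this.1, this.2]
theorem main2 (k : Int) (hk : 2 ≤ k) : get_ML3B k = get_ML3B_alt k := by
  have hkk : 0 ≤ k*(k-1) := by nlinarith
  have hk1 : (0:Int) < k - 1 := by omega
  apply List.ext_getElem?
  intro n
  rw [A_getElem?]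
  have hB : (get_ML3B_alt k)[n]? =
      ((PySem.List.pyRange (1+k*(k-1) - k) (1+k*(k-1)) 1 ::
          (PySem.List.pyRange 1 (1+k*(k-1)) 1).map (fun _ => ([] : List Int))))[n]?.map
        (fun row =>
          ((PySem.List.pyRange 0 k 1).flatMap (fun i => (PySem.List.pyRange 0 (k-1) 1).flatMap
              (fun t => if i*(k-1)+t+1 = (n : Int) then [(i, t)] else []))).foldl
            (fun r p => [1+k*(k-1) - k + p.1] ++
              (if p.1 = 0 then (PySem.List.pyRange 0 (k-1) 1).map (fun j => p.2*(k-1)+j)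
               else if p.1 = 1 then (PySem.List.pyRange 0 (k-1) 1).map (fun j => j*(k-1)+p.2)
               else (PySem.List.pyRange 0 (k-1) 1).map (fun j =>
                 PySem.Int.mod ((p.1-1)*j + p.2) (k-1) + j*(k-1)))) row) :=
    getElem?_foldl2_mod (PySem.List.pyRange 0 k 1) (PySem.List.pyRange 0 (k-1) 1)
      (fun i t => i*(k-1)+t+1) _ _ n
  rw [hB, hits_eval k n hk]
  by_cases hn : (n : Int) < 1 + k*(k-1)
  · rw [List.getElem?_map, PySem.List.getElem?_pyRange_one, if_pos (by omega)]
    simp only [Option.map_some]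
    rw [W2_eval k n hk, W3_eval k n hk, W4_eval k n hk, W5_eval k n hk]
    rcases n with _ | m
    · -- row 0
      simp only [Nat.cast_zero]
      have hQ : PySem.Int.floordiv ((0:Int) - 1) (k - 1) = -1 :=
        (PySem.Int.floordiv_eq_iff_of_pos hk1).mpr ⟨by linarith, by linarith⟩
      rw [hQ, if_neg (by omega), if_neg (by omega), if_neg (by omega), if_neg (by omega),
          if_neg (by omega), List.getElem?_cons_zero]
      simp only [Option.map_some, List.foldl_nil]
      refine congrArg some ?_
      simp only [List.nil_append, List.append_nil]
      refine Eq.trans (flatMap_singleton_eq_map _ _) ?_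
      rw [map_shift_pyRange (1+k*(k-1)-k) k _ (fun x => by ring)]
      congr 1
      ring
    · -- rows ≥ 1
      rw [List.getElem?_cons_succ, List.getElem?_map, PySem.List.getElem?_pyRange_one,
          if_pos (show m < (1+k*(k-1)-1).toNat by omega)]
      simp only [Option.map_some]
      set N : Int := ((m+1 : Nat) : Int) with hNdef
      set Q : Int := PySem.Int.floordiv (N - 1) (k - 1) with hQd
      set loc : Int := PySem.Int.mod (N - 1) (k - 1) with hlocd
      have hge : (1:Int) ≤ N := by rw [hNdef]; push_cast; omega
      have hdm : Q * (k-1) + loc = N - 1 := PySem.Int.floordiv_mul_add_mod (N-1) (k-1)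
      have hloc0 : 0 ≤ loc := PySem.Int.mod_nonneg (N-1) hk1
      have hlock : loc < k - 1 := PySem.Int.mod_lt (N-1) hk1
      have hQ0 : 0 ≤ Q := by
        rw [hQd]
        exact (PySem.Int.le_floordiv_iff_mul_le hk1).mpr (by linarith)
      have hQk : Q < k := by
        rw [hQd]
        exact (PySem.Int.floordiv_lt_iff_lt_mul hk1).mpr (by nlinarith [hn])
      have hW1z : (PySem.List.pyRange 0 k 1).flatMap
          (fun i => if (0:Int) = N then [1+k*(k-1) + i - k] else []) = [] := by
        rw [List.flatMap_eq_nil_iff]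
        intro x hx
        rw [if_neg (show ¬((0:Int) = N) by omega)]
      have hloc' : N - Q*(k-1) - 1 = loc := by linarith
      rw [hW1z, if_pos (show 0 ≤ Q ∧ Q < k from ⟨hQ0, hQk⟩),
          if_pos (show 0 ≤ Q ∧ Q < k from ⟨hQ0, hQk⟩), List.foldl_cons, List.foldl_nil]
      simp only [List.nil_append]
      rw [hloc']
      by_cases hq0 : Q = 0
      · have hlocv : loc = N - 1 := by rw [hq0] at hdm; linarith
        rw [if_pos hq0, if_pos (show 0 ≤ N-1 ∧ N-1 < k-1 by omega),
            if_neg (show ¬(0 ≤ N-k ∧ N-k < k-1) by omega),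
            if_neg (show ¬(0 ≤ Q-2 ∧ Q-2 < k-2) by omega),
            hlocv]
        simp
      · by_cases hq1 : Q = 1
        · have hdm1 : (k-1) + loc = N - 1 := by rw [hq1] at hdm; linarith
          have hlocv : loc = N - k := by omega
          rw [if_neg hq0, if_pos hq1,
              if_neg (show ¬(0 ≤ N-1 ∧ N-1 < k-1) by omega),
              if_pos (show 0 ≤ N-k ∧ N-k < k-1 by omega),
              if_neg (show ¬(0 ≤ Q-2 ∧ Q-2 < k-2) by omega),
              hlocv]
          simp
        · have hq2 : 2 ≤ Q := by omega
          have h2 : 2*(k-1) ≤ Q*(k-1) := mul_le_mul_of_nonneg_right (by omega) (by omega)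
          have hidxv : N - (Q*(k-1)+1) = loc := by linarith
          rw [if_neg hq0, if_neg hq1,
              if_neg (show ¬(0 ≤ N-1 ∧ N-1 < k-1) by rintro ⟨h1', h2'⟩; linarith),
              if_neg (show ¬(0 ≤ N-k ∧ N-k < k-1) by rintro ⟨h1', h2'⟩; linarith),
              if_pos (show 0 ≤ Q-2 ∧ Q-2 < k-2 by omega),
              if_pos (show 0 ≤ N - (Q*(k-1)+1) ∧ N - (Q*(k-1)+1) < k-1 by omega),
              hidxv]
          simp
  · rw [List.getElem?_eq_none (by
      simp only [List.length_map, PySem.List.length_pyRange_one]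
      omega)]
    rw [List.getElem?_eq_none (by
      simp only [List.length_cons, List.length_map, PySem.List.length_pyRange_one]
      omega)]
    rfl

theorem main_le0 (k : Int) (hk : k ≤ 0) : get_ML3B k = get_ML3B_alt k := by
  have hkk : 0 ≤ k*(k-1) := by nlinarith
  have hA : get_ML3B k = (PySem.List.pyRange 0 (1+k*(k-1)) 1).map (fun _ => []) := by
    rw [A_stages]
    simp only [pvFillInBlock]
    rw [PySem.List.pyRange_one_eq_nil (show k ≤ (0:Int) from hk),
        PySem.List.pyRange_one_eq_nil (show k-1 ≤ (0:Int) by omega),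
        PySem.List.pyRange_one_eq_nil (show k-2 ≤ (0:Int) by omega)]
    simp only [List.foldl_nil]
  have hB : get_ML3B_alt k = PySem.List.pyRange (1+k*(k-1)-k) (1+k*(k-1)) 1 ::
      (PySem.List.pyRange 1 (1+k*(k-1)) 1).map (fun _ => []) := by
    have h0 : get_ML3B_alt k = (PySem.List.pyRange 0 k 1).foldl
        (fun rows i => (PySem.List.pyRange 0 (k - 1) 1).foldl
          (fun rows t =>
            pvModAt rows (i * (k - 1) + t + 1)
              (fun _ => [1 + k * (k - 1) - k + i] ++
                (if i = 0 then (PySem.List.pyRange 0 (k - 1) 1).map (fun j => t * (k - 1) + j)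
                 else if i = 1 then (PySem.List.pyRange 0 (k - 1) 1).map (fun j => j * (k - 1) + t)
                 else (PySem.List.pyRange 0 (k - 1) 1).map (fun j =>
                   PySem.Int.mod ((i - 1) * j + t) (k - 1) + j * (k - 1))))) rows)
        (PySem.List.pyRange (1+k*(k-1) - k) (1+k*(k-1)) 1 ::
          (PySem.List.pyRange 1 (1+k*(k-1)) 1).map (fun _ => [])) := rfl
    rw [h0, PySem.List.pyRange_one_eq_nil (show k ≤ (0:Int) from hk), List.foldl_nil]
  rw [hA, hB, PySem.List.pyRange_one_cons (show (0:Int) < 1+k*(k-1) by omega)]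
  simp only [List.map_cons]
  congr 1
  rw [PySem.List.pyRange_one_eq_nil (by omega)]
-- ===== VERDICT (by name: the statement is the Claim_ definition above) =====
theorem get_ML3B_spec : Claim_equal_get_ML3B := by
  unfold Claim_equal_get_ML3B
  intro k _
  unfold Spec_get_ML3B
  by_cases hk2 : 2 ≤ k
  · exact main2 k hk2
  · by_cases h1 : k = 1
    · subst h1; decide
    · exact main_le0 k (by omega)
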